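-- pv_equiv track=rewrite | github.com/alexandrath/axolotl | compute_sta_from_spikes.py | _lcg_combine
-- ===== SOURCE A (Python) =====
-- _MASK48 = (1 << 48) - 1
--
-- def _lcg_combine(a, c, steps):
--     """
--     Return (mul, add) so that applying the LCG `steps` times equals:
--         s_next = mul * s + add  (mod 2^48)
--     """
--     mul, add = 1, 0
--     while steps > 0:
--         if steps & 1:
--             add = (add * a + c) & _MASK48
--             mul = (mul * a) & _MASK48
--         c = (c * (a + 1)) & _MASK48
--         a = (a * a) & _MASK48
--         steps >>= 1
--     return mul, add
-- ===== SOURCE B (Python) =====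
-- _MASK48 = (1 << 48) - 1
--
--
-- def _compose(m1, m2):
--     """Compose two affine maps mod 2^48: apply m2 first, then m1."""
--     a1, c1 = m1
--     a2, c2 = m2
--     return (a1 * a2) & _MASK48, (a1 * c2 + c1) & _MASK48
--
--
-- def _power(m, n):
--     """n-fold composition of the affine map m (identity for n <= 0)."""
--     if n <= 0:
--         return 1, 0
--     h = _power(m, n // 2)
--     sq = _compose(h, h)
--     return sq if n % 2 == 0 else _compose(m, sq)
--
--
-- def _lcg_combine(a, c, steps):
--     """
--     Return (mul, add) so that applying the LCG `steps` times equals: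
--         s_next = mul * s + add  (mod 2^48)
--     """
--     return _power((a, c), steps)
-- ===== Notes on version B (the rewrite author's own statement) =====
-- stated objective: alternative
-- what changed: Replaces the iterative bit-scanning accumulator loop with a recursive affine-map exponentiation: a compose helper for masked affine maps and a halving power function that squares the half result and composes once more on odd exponents.
import Mathlib
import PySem

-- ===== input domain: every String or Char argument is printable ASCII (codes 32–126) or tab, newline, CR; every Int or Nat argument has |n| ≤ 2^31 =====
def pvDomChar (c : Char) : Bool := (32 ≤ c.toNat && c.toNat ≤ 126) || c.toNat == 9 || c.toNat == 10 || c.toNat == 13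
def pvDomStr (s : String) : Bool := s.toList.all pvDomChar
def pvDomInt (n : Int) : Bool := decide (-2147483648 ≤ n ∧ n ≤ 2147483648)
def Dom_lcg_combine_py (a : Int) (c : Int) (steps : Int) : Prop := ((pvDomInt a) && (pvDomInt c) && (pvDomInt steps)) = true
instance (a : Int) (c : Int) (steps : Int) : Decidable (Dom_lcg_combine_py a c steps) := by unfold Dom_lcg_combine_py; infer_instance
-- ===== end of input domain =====

-- B replaces A's iterative bit-scanning accumulator loop by a recursive halving
-- exponentiation of affine maps (compose a half-power with itself, once more with
-- the base map on odd exponents); same results, a different decomposition.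

-- `_MASK48 = (1 << 48) - 1`
def pvMASK48 : Int := (1 <<< 48) - 1

-- termination helper for both ports: `steps >> 1` of a positive int, as a Nat halving
theorem pv_shiftRight_one (s : Int) (h : 0 < s) :
    s >>> (1 : Nat) = ((s.toNat / 2 : Nat) : Int) := by
  obtain ⟨n, rfl⟩ := Int.eq_ofNat_of_zero_le h.le
  rw [← Int.natCast_shiftRight, Nat.shiftRight_eq_div_pow]
  simp

-- termination helper: `n // 2` of a positive int, as a Nat halving
theorem pv_floordiv_two (n : Int) (h : 0 < n) :
    PySem.Int.floordiv n 2 = ((n.toNat / 2 : Nat) : Int) := by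
  obtain ⟨m, rfl⟩ := Int.eq_ofNat_of_zero_le h.le
  simp only [PySem.Int.floordiv]
  rw [Int.fdiv_eq_ediv_of_nonneg _ (by norm_num)]
  omega

-- ===== PORT A =====
-- the `while steps > 0` loop of `_lcg_combine`, state (a, c, steps, mul, add)
def lcgLoopA (a c steps mul add : Int) : Int × Int :=
  if h : 0 < steps then
    if PySem.Int.band steps 1 ≠ 0 then
      lcgLoopA (PySem.Int.band (a * a) pvMASK48) (PySem.Int.band (c * (a + 1)) pvMASK48)
        (steps >>> (1 : Nat)) (PySem.Int.band (mul * a) pvMASK48) (PySem.Int.band (add * a + c) pvMASK48)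
    else
      lcgLoopA (PySem.Int.band (a * a) pvMASK48) (PySem.Int.band (c * (a + 1)) pvMASK48)
        (steps >>> (1 : Nat)) mul add
  else (mul, add)
termination_by steps.toNat
decreasing_by all_goals (rw [pv_shiftRight_one steps h]; omega)

def lcg_combine_py (a : Int) (c : Int) (steps : Int) : Int × Int :=
  lcgLoopA a c steps 1 0

-- ===== PORT B =====
-- `_compose(m1, m2)`: masked affine composition (apply m2 first, then m1)
def lcgCompose (m1 m2 : Int × Int) : Int × Int :=
  (PySem.Int.band (m1.1 * m2.1) pvMASK48, PySem.Int.band (m1.1 * m2.2 + m1.2) pvMASK48)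

-- `_power(m, n)`: n-fold composition by halving recursion
def lcgPower (m : Int × Int) (n : Int) : Int × Int :=
  if h : n ≤ 0 then (1, 0)
  else
    let hp := lcgPower m (PySem.Int.floordiv n 2)
    let sq := lcgCompose hp hp
    if PySem.Int.mod n 2 = 0 then sq else lcgCompose m sq
termination_by n.toNat
decreasing_by rw [pv_floordiv_two n (by omega)]; omega

def lcg_combine_py_alt (a : Int) (c : Int) (steps : Int) : Int × Int :=
  lcgPower (a, c) steps

-- ===== PRECONDITION & SPEC =====
def Spec_lcg_combine_py (a : Int) (c : Int) (steps : Int) (out : Int × Int) : Prop := out = lcg_combine_py_alt a c steps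
instance (a : Int) (c : Int) (steps : Int) (out : Int × Int) : Decidable (Spec_lcg_combine_py a c steps out) := by unfold Spec_lcg_combine_py; infer_instance

-- ===== CLAIM (what is proved, stated in full; the proofs are below) =====
def Claim_equal_lcg_combine_py : Prop := ∀ (a : Int) (c : Int) (steps : Int), Dom_lcg_combine_py a c steps → Spec_lcg_combine_py a c steps (lcg_combine_py a c steps)

-- ===== LEMMAS AND PROOFS =====

-- the masked residues live in ZMod 2^48 (281474976710656 = 2^48)
def zc (x y : ZMod 281474976710656 × ZMod 281474976710656) :
    ZMod 281474976710656 × ZMod 281474976710656 :=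
  (x.1 * y.1, x.1 * y.2 + x.2)

def zp (z : ZMod 281474976710656 × ZMod 281474976710656) :
    Nat → ZMod 281474976710656 × ZMod 281474976710656
  | 0 => (1, 0)
  | k + 1 => zc z (zp z k)

def phiM (m : Int × Int) : ZMod 281474976710656 × ZMod 281474976710656 :=
  ((m.1 : ZMod 281474976710656), (m.2 : ZMod 281474976710656))

theorem band_mask (x : Int) :
    PySem.Int.band x pvMASK48 = x % (281474976710656 : Int) := by
  have hM : pvMASK48 = ((2 ^ 48 - 1 : Nat) : Int) := by decide
  have hM0 : (0 : Int) ≤ pvMASK48 := by decide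
  have hMt : pvMASK48.toNat = 2 ^ 48 - 1 := by decide
  have hT : (2 : Nat) ^ 48 = 281474976710656 := by norm_num
  unfold PySem.Int.band
  by_cases hx : 0 ≤ x
  · rw [if_pos hx, if_pos hM0, hMt, Nat.and_two_pow_sub_one_eq_mod, hT]
    omega
  · rw [if_neg hx, if_pos hM0, hMt, Nat.and_comm, Nat.and_two_pow_sub_one_eq_mod, hT]
    omega

theorem cast_band (x : Int) :
    ((PySem.Int.band x pvMASK48 : Int) : ZMod 281474976710656) = (x : ZMod 281474976710656) := by
  rw [band_mask]
  have := ZMod.intCast_mod x 281474976710656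
  simpa using this

theorem band_range (x : Int) :
    0 ≤ PySem.Int.band x pvMASK48 ∧ PySem.Int.band x pvMASK48 < 281474976710656 := by
  rw [band_mask]; omega

theorem zc_assoc (x y z : ZMod 281474976710656 × ZMod 281474976710656) :
    zc (zc x y) z = zc x (zc y z) := by
  simp only [zc, Prod.ext_iff]; constructor <;> ring

theorem zc_one_left (z : ZMod 281474976710656 × ZMod 281474976710656) :
    zc (1, 0) z = z := by
  simp [zc]

theorem zc_one_right (z : ZMod 281474976710656 × ZMod 281474976710656) :
    zc z (1, 0) = z := by
  simp [zc]

theorem zp_add (z : ZMod 281474976710656 × ZMod 281474976710656) (i j : Nat) :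
    zp z (i + j) = zc (zp z i) (zp z j) := by
  induction i with
  | zero => simp [zp, zc_one_left]
  | succ k ih =>
    rw [Nat.succ_add]
    show zc z (zp z (k + j)) = zc (zc z (zp z k)) (zp z j)
    rw [ih, zc_assoc]

theorem zc_pow_comm (z : ZMod 281474976710656 × ZMod 281474976710656) (k : Nat) :
    zc (zp z k) z = zc z (zp z k) := by
  have h1 : zp z 1 = z := by simp [zp, zc_one_right]
  calc zc (zp z k) z = zc (zp z k) (zp z 1) := by rw [h1]
    _ = zp z (k + 1) := (zp_add z k 1).symm
    _ = zc z (zp z k) := rfl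

theorem zp_double (z : ZMod 281474976710656 × ZMod 281474976710656) (k : Nat) :
    zp (zc z z) k = zp z (2 * k) := by
  induction k with
  | zero => rfl
  | succ k ih =>
    show zc (zc z z) (zp (zc z z) k) = _
    rw [ih, Nat.mul_succ]
    show _ = zc z (zp z (2 * k + 1))
    show _ = zc z (zc z (zp z (2 * k)))
    rw [zc_assoc]

theorem phi_compose (m1 m2 : Int × Int) :
    phiM (lcgCompose m1 m2) = zc (phiM m1) (phiM m2) := by
  simp [lcgCompose, phiM, zc, cast_band]

theorem pv_mod_two (n : Int) (h : 0 < n) :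
    PySem.Int.mod n 2 = ((n.toNat % 2 : Nat) : Int) := by
  obtain ⟨m, rfl⟩ := Int.eq_ofNat_of_zero_le h.le
  simp [PySem.Int.mod, Int.fmod_eq_emod]

theorem pv_band_one (s : Int) (h : 0 < s) :
    PySem.Int.band s 1 = ((s.toNat % 2 : Nat) : Int) := by
  rw [PySem.Int.band_one, pv_mod_two s h]

theorem power_char (m : Int × Int) (n : Int) :
    phiM (lcgPower m n) = zp (phiM m) n.toNat := by
  induction n using lcgPower.induct with
  | m => exact m
  | case1 n h =>
    rw [lcgPower, dif_pos h]
    have hz : n.toNat = 0 := by omega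
    rw [hz]
    simp [zp, phiM]
  | case2 n h hpar ih =>
    rw [lcgPower, dif_neg h, if_pos hpar]
    have hn : 0 < n := by omega
    have hk : (PySem.Int.floordiv n 2).toNat = n.toNat / 2 := by
      rw [pv_floordiv_two n hn]; omega
    rw [phi_compose, ih, hk, ← zp_add]
    congr 1
    rw [pv_mod_two n hn] at hpar
    omega
  | case3 n h hpar ih =>
    rw [lcgPower, dif_neg h, if_neg hpar]
    have hn : 0 < n := by omega
    have hk : (PySem.Int.floordiv n 2).toNat = n.toNat / 2 := by
      rw [pv_floordiv_two n hn]; omega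
    rw [phi_compose, phi_compose, ih, hk, ← zp_add]
    rw [pv_mod_two n hn] at hpar
    have hfold : zc (phiM m) (zp (phiM m) (n.toNat / 2 + n.toNat / 2)) =
        zp (phiM m) (n.toNat / 2 + n.toNat / 2 + 1) := rfl
    rw [hfold]
    congr 1
    omega

theorem loop_char (a c steps mul add : Int) :
    phiM (lcgLoopA a c steps mul add) =
      zc (zp (phiM (a, c)) steps.toNat) (phiM (mul, add)) := by
  induction a, c, steps, mul, add using lcgLoopA.induct with
  | case1 a c steps mul add h hodd ih =>
    rw [lcgLoopA, dif_pos h, if_pos hodd]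
    have hk : (steps >>> (1 : Nat)).toNat = steps.toNat / 2 := by
      rw [pv_shiftRight_one steps h]; omega
    have hsq : phiM (PySem.Int.band (a * a) pvMASK48, PySem.Int.band (c * (a + 1)) pvMASK48) =
        zc (phiM (a, c)) (phiM (a, c)) := by
      simp only [phiM, zc, cast_band]
      simp only [Prod.mk.injEq]
      push_cast
      constructor <;> ring
    have hmw : phiM (PySem.Int.band (mul * a) pvMASK48, PySem.Int.band (add * a + c) pvMASK48) =
        zc (phiM (a, c)) (phiM (mul, add)) := by
      simp only [phiM, zc, cast_band]
      simp only [Prod.mk.injEq]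
      push_cast
      constructor <;> ring
    rw [ih, hk, hsq, zp_double, hmw, ← zc_assoc, zc_pow_comm]
    have hfold : zc (phiM (a, c)) (zp (phiM (a, c)) (2 * (steps.toNat / 2))) =
        zp (phiM (a, c)) (2 * (steps.toNat / 2) + 1) := rfl
    rw [hfold]
    congr 2
    rw [pv_band_one steps h] at hodd
    omega
  | case2 a c steps mul add h hodd ih =>
    rw [lcgLoopA, dif_pos h, if_neg hodd]
    have hk : (steps >>> (1 : Nat)).toNat = steps.toNat / 2 := by
      rw [pv_shiftRight_one steps h]; omega
    have hsq : phiM (PySem.Int.band (a * a) pvMASK48, PySem.Int.band (c * (a + 1)) pvMASK48) =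
        zc (phiM (a, c)) (phiM (a, c)) := by
      simp only [phiM, zc, cast_band]
      simp only [Prod.mk.injEq]
      push_cast
      constructor <;> ring
    rw [ih, hk, hsq, zp_double]
    congr 2
    rw [pv_band_one steps h] at hodd
    simp only [ne_eq, not_not] at hodd
    omega
  | case3 a c steps mul add h =>
    rw [lcgLoopA, dif_neg h]
    have hz : steps.toNat = 0 := by omega
    rw [hz]
    show phiM (mul, add) = zc (1, 0) (phiM (mul, add))
    rw [zc_one_left]

def InR (x : Int) : Prop := 0 ≤ x ∧ x < 281474976710656

theorem loop_range (a c steps mul add : Int) :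
    InR mul → InR add →
    InR (lcgLoopA a c steps mul add).1 ∧ InR (lcgLoopA a c steps mul add).2 := by
  induction a, c, steps, mul, add using lcgLoopA.induct with
  | case1 a c steps mul add h hodd ih =>
    intro _ _
    rw [lcgLoopA, dif_pos h, if_pos hodd]
    exact ih ⟨(band_range _).1, (band_range _).2⟩ ⟨(band_range _).1, (band_range _).2⟩
  | case2 a c steps mul add h hodd ih =>
    intro hm ha
    rw [lcgLoopA, dif_pos h, if_neg hodd]
    exact ih hm ha
  | case3 a c steps mul add h =>
    intro hm ha
    rw [lcgLoopA, dif_neg h]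
    exact ⟨hm, ha⟩

theorem power_range (m : Int × Int) (n : Int) :
    InR (lcgPower m n).1 ∧ InR (lcgPower m n).2 := by
  induction n using lcgPower.induct with
  | m => exact m
  | case1 n h =>
    rw [lcgPower, dif_pos h]
    exact ⟨⟨by norm_num, by norm_num⟩, ⟨le_refl 0, by norm_num⟩⟩
  | case2 n h hpar ih =>
    rw [lcgPower, dif_neg h, if_pos hpar]
    exact ⟨⟨(band_range _).1, (band_range _).2⟩, ⟨(band_range _).1, (band_range _).2⟩⟩
  | case3 n h hpar ih =>
    rw [lcgPower, dif_neg h, if_neg hpar]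
    exact ⟨⟨(band_range _).1, (band_range _).2⟩, ⟨(band_range _).1, (band_range _).2⟩⟩

theorem int_eq_of_cast_eq (x y : Int) (hx : InR x) (hy : InR y)
    (h : (x : ZMod 281474976710656) = (y : ZMod 281474976710656)) : x = y := by
  have hmod := (ZMod.intCast_eq_intCast_iff x y 281474976710656).mp h
  unfold Int.ModEq at hmod
  unfold InR at hx hy
  omega

-- ===== VERDICT (by name: the statement is the Claim_ definition above) =====
theorem lcg_combine_py_spec : Claim_equal_lcg_combine_py := by
  intro a c steps _
  unfold Spec_lcg_combine_py
  unfold lcg_combine_py lcg_combine_py_alt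
  have h1 : phiM (lcgLoopA a c steps 1 0) = phiM (lcgPower (a, c) steps) := by
    rw [loop_char, power_char]
    have : phiM ((1 : Int), (0 : Int)) = (1, 0) := by simp [phiM]
    rw [this, zc_one_right]
  have hA := loop_range a c steps 1 0 ⟨by norm_num, by norm_num⟩ ⟨le_refl 0, by norm_num⟩
  have hB := power_range (a, c) steps
  have e1 : (lcgLoopA a c steps 1 0).1 = (lcgPower (a, c) steps).1 :=
    int_eq_of_cast_eq _ _ hA.1 hB.1 (congrArg Prod.fst h1)
  have e2 : (lcgLoopA a c steps 1 0).2 = (lcgPower (a, c) steps).2 :=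
    int_eq_of_cast_eq _ _ hA.2 hB.2 (congrArg Prod.snd h1)
  exact Prod.ext_iff.mpr ⟨e1, e2⟩
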